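-- pv_equiv track=rewrite | github.com/edt-yxz-zzd/txt_phone | lots/NOTE/music/All about Music Theory - A Fun and Simple Guide to Understanding Music (2009)(Mark Harrison)/major scale - miss notes.py | miss_N_notes
-- ===== SOURCE A (Python) =====
-- from itertools import combinations
--
-- steps = (1,2,2,1,2,2,2) # 0==7; step[i] = pitch(i+1)-pitch(i)
--
-- def miss_N_notes(num_misses, steps=steps):
--     # 0 < N < D = len(steps)
--     # D == 7; N = num_misses
--     # @yield : steps'::tuple, miss_notes::frozenset
--     #       where len(steps') == D-N, len(miss_notes)=N
--     D = len(steps)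
--     N = num_misses
--     assert 0 < N < D
--     for misses in combinations(range(D), N):
--         will_drops = [False]*D
--         for x in misses:
--             will_drops[x]=True
--         steps_ = [0]
--         # steps'[0] to wrap the list
--         for will_drop, step, note in zip(will_drops, steps, range(D)):
--             # current: step'[-1] === step{prev(note)-[skip_miss]->note}
--             # input: step = steps[note] = step{note->note+1}
--             if will_drop:
--                 # drop note;
--                 steps_[-1] += step
--                 # step'[-1] === step{prev(note)-[skip_miss]->note->note+1}
--                 # drop note ==>> prev(note+1) == prev(note)
--                 # next round begins with:
--                 #   step'[-1] === step{prev(note+1)-[skip_miss]->note+1}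
--             else:
--                 # not drop note
--                 steps_.append(step)
--                 # step'[-1] === step{note->note+1}
--                 # not drop note ==>> prev(note+1) == note
--                 # next round begins with:
--                 #   step'[-1] === step{prev(note+1)-[skip_miss]->note+1}
--
--         last = steps_.pop()
--         steps_[0] += last
--         steps_ = tuple(steps_)
--         assert len(steps_) == D-N
--         assert sum(steps_) == sum(steps)
--         misses = frozenset(misses)
--         assert len(misses) == N
--         yield steps_, misses
-- ===== SOURCE B (Python) =====
-- from itertools import combinations
--
-- steps = (1,2,2,1,2,2,2)
--
-- def miss_N_notes(num_misses, steps=steps):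
--     # prefix-sum re-implementation: per combination, emit pitch-differences of
--     # the kept notes (with the head entry wrapping around the circle)
--     D = len(steps)
--     N = num_misses
--     assert 0 < N < D
--     pitch = []
--     acc = 0
--     for st in steps:
--         pitch.append(acc)
--         acc += st
--     total = acc
--     for misses in combinations(range(D), N):
--         ms = frozenset(misses)
--         kp = [pv for p, pv in zip(range(D), pitch) if p not in ms]
--         out = [kp[0] - kp[-1] + total] + [b - a for a, b in zip(kp, kp[1:])]
--         yield tuple(out), ms
-- ===== Notes on version B (the rewrite author's own statement) =====
-- stated objective: alternative
-- what changed: A builds each variant by streaming over a drop-mask, mutating the last accumulator entry and fixing up with a pop-and-wrap; B precomputes a prefix-pitch table once and emits each variant directly as pitch differences of the kept positions (head entry = circular wrap gap).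
import Mathlib
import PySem

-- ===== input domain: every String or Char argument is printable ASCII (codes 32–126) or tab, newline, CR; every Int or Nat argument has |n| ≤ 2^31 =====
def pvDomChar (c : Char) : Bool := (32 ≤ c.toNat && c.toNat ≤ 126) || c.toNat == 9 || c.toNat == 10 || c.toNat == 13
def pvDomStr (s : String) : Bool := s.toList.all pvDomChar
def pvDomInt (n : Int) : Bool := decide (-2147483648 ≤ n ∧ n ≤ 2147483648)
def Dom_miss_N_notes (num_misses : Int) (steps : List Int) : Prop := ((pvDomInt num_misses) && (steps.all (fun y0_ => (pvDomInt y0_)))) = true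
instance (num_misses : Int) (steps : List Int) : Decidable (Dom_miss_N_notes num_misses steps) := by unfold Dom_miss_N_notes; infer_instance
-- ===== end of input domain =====

-- B replaces A's drop-mask stream accumulation (append / add-to-last / pop-and-wrap) by a
-- prefix-pitch table computed once plus per-combination pitch differences of the kept notes.
-- Both versions enumerate combinations in the same (lexicographic) order.

-- shared helper: itertools.combinations(l, n) in lexicographic order (used by both ports)
def pvCombos : List Int → Nat → List (List Int)
  | _, 0 => [[]]
  | [], _ + 1 => []
  | x :: r, n + 1 => ((pvCombos r n).map (fun c => x :: c)) ++ pvCombos r (n + 1)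

-- ===== PORT A =====
-- steps_[-1] += step  (Python mutation of the last element; list is never empty here)
def pvAddLast : List Int → Int → List Int
  | [], _ => []
  | [x], v => [x + v]
  | x :: y :: r, v => x :: pvAddLast (y :: r) v

-- one yielded steps' for one combination `misses` (A's inner loops, step for step)
def pvRowA (steps : List Int) (misses : List Int) : List Int :=
  let D := steps.length
  -- will_drops = [False]*D; for x in misses: will_drops[x] = True   (x ∈ range(D), so toNat is exact)
  let wd := misses.foldl (fun w x => w.set x.toNat true) (List.replicate D false)
  -- steps_ = [0]; for will_drop, step in zip(will_drops, steps): ...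
  let s := (wd.zip steps).foldl (fun s p => if p.1 then pvAddLast s p.2 else s ++ [p.2]) [0]
  -- last = steps_.pop(); steps_[0] += last
  let last := s.getLastD 0
  match s.dropLast with
  | [] => []            -- Python IndexError (only when no note is kept); unreachable under Pre_
  | y :: r => (y + last) :: r

def miss_N_notes (num_misses : Int) (steps : List Int) : List (List Int × List Int) :=
  let D := (steps.length : Int)
  (pvCombos (PySem.List.pyRange 0 D 1) num_misses.toNat).map
    (fun misses => (pvRowA steps misses, PySem.Set.ofList misses))

-- ===== PORT B =====
-- pitch = []; acc = 0; for st in steps: pitch.append(acc); acc += st   — returns (pitch, acc)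
def pvPitchAcc : List Int → Int → List Int × Int
  | [], acc => ([], acc)
  | st :: r, acc =>
    let p := pvPitchAcc r (acc + st)
    (acc :: p.1, p.2)

-- one output tuple for one combination: pitch differences of the kept notes
def pvRowB (pitch : List Int) (total : Int) (D : Int) (ms : PySem.Set Int) : List Int :=
  let kp := (((PySem.List.pyRange 0 D 1).zip pitch).filter
              (fun x => !(PySem.Set.contains ms x.1))).map (fun x => x.2)
  match kp with
  | [] => []            -- Python IndexError on kp[0]; unreachable under Pre_
  | k0 :: _ => (k0 - kp.getLastD 0 + total) :: (kp.zip kp.tail).map (fun ab => ab.2 - ab.1)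

def miss_N_notes_alt (num_misses : Int) (steps : List Int) : List (List Int × List Int) :=
  let D := (steps.length : Int)
  let pa := pvPitchAcc steps 0
  (pvCombos (PySem.List.pyRange 0 D 1) num_misses.toNat).map
    (fun misses =>
      let ms := PySem.Set.ofList misses
      (pvRowB pa.1 pa.2 D ms, ms))

-- ===== PRECONDITION & SPEC =====
-- A executes `assert 0 < N < D` and raises AssertionError otherwise; Pre_ is exactly that guard.
def Pre_miss_N_notes (num_misses : Int) (steps : List Int) : Prop :=
  0 < num_misses ∧ num_misses < (steps.length : Int)
instance (num_misses : Int) (steps : List Int) : Decidable (Pre_miss_N_notes num_misses steps) := by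
  unfold Pre_miss_N_notes; infer_instance

def pvWitness_miss_N_notes : Int × List Int := (2, [1, 2, 2, 1, 2, 2, 2])

def Spec_miss_N_notes (num_misses : Int) (steps : List Int) (out : List (List Int × List Int)) : Prop := out = miss_N_notes_alt num_misses steps
instance (num_misses : Int) (steps : List Int) (out : List (List Int × List Int)) : Decidable (Spec_miss_N_notes num_misses steps out) := by unfold Spec_miss_N_notes; infer_instance

-- ===== CLAIM (what is proved, stated in full; the proofs are below) =====
def Claim_equal_miss_N_notes : Prop := ∀ (num_misses : Int) (steps : List Int), Dom_miss_N_notes num_misses steps → Pre_miss_N_notes num_misses steps → Spec_miss_N_notes num_misses steps (miss_N_notes num_misses steps)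

-- ===== LEMMAS AND PROOFS =====

-- membership facts for pvCombos
lemma pvCombos_subset {l : List Int} : ∀ {n : Nat} {c : List Int}, c ∈ pvCombos l n → ∀ e ∈ c, e ∈ l := by
  induction l with
  | nil => intro n c h; cases n <;> simp [pvCombos] at h <;> simp [h]
  | cons x r ih =>
    intro n c h e he
    cases n with
    | zero => simp [pvCombos] at h; simp [h] at he
    | succ m =>
      simp [pvCombos] at h
      rcases h with ⟨c', hc', rfl⟩ | h
      · rcases List.mem_cons.mp he with rfl | he'
        · simp
        · simp [ih hc' e he']
      · simp [ih h e he]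

lemma pvCombos_length {l : List Int} : ∀ {n : Nat} {c : List Int}, c ∈ pvCombos l n → c.length = n := by
  induction l with
  | nil => intro n c h; cases n <;> simp [pvCombos] at h; simp [h]
  | cons x r ih =>
    intro n c h
    cases n with
    | zero => simp [pvCombos] at h; simp [h]
    | succ m =>
      simp [pvCombos] at h
      rcases h with ⟨c', hc', rfl⟩ | h
      · simp [ih hc']
      · exact ih h

-- pvAddLast facts
lemma pvAddLast_zero (s : List Int) : pvAddLast s 0 = s := by
  induction s with
  | nil => simp [pvAddLast]
  | cons a s ih =>
    cases s with
    | nil => simp [pvAddLast]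
    | cons b t => simp [pvAddLast, ih]

lemma pvAddLast_cons_of_ne_nil {s : List Int} (h : s ≠ []) (a v : Int) :
    pvAddLast (a :: s) v = a :: pvAddLast s v := by
  cases s with
  | nil => simp at h
  | cons b t => simp [pvAddLast]

lemma pvAddLast_addLast (s : List Int) (x y : Int) :
    pvAddLast (pvAddLast s x) y = pvAddLast s (x + y) := by
  induction s with
  | nil => simp [pvAddLast]
  | cons a s ih =>
    cases s with
    | nil => simp [pvAddLast]; ring
    | cons b t =>
      rw [pvAddLast_cons_of_ne_nil (by simp) a x,
          pvAddLast_cons_of_ne_nil (by cases t <;> simp [pvAddLast]) a y,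
          pvAddLast_cons_of_ne_nil (by simp) a (x + y), ih]

lemma pvAddLast_append (s : List Int) (x y : Int) :
    pvAddLast (s ++ [x]) y = s ++ [x + y] := by
  induction s with
  | nil => simp [pvAddLast]
  | cons a s ih =>
    cases s with
    | nil => simp [pvAddLast]
    | cons b t => simpa [pvAddLast] using ih

lemma pvAddLast_ne_nil {s : List Int} (h : s ≠ []) (x : Int) : pvAddLast s x ≠ [] := by
  cases s with
  | nil => simp at h
  | cons a s => cases s <;> simp [pvAddLast]

-- the gap/segment view of A's stream loop
def pvSegs : List (Bool × Int) → Int × List Int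
  | [] => (0, [])
  | (d, st) :: r =>
    let p := pvSegs r
    if d then (st + p.1, p.2) else (0, (st + p.1) :: p.2)

lemma pvFoldA (pairs : List (Bool × Int)) : ∀ (s : List Int), s ≠ [] →
    pairs.foldl (fun s p => if p.1 then pvAddLast s p.2 else s ++ [p.2]) s
      = pvAddLast s (pvSegs pairs).1 ++ (pvSegs pairs).2 := by
  induction pairs with
  | nil => intro s hs; simp [pvSegs, pvAddLast_zero]
  | cons p r ih =>
    intro s hs
    obtain ⟨d, st⟩ := p
    cases d with
    | true =>
      simp only [List.foldl_cons, if_pos, pvSegs]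
      rw [ih (pvAddLast s st) (pvAddLast_ne_nil hs st), pvAddLast_addLast]
    | false =>
      simp only [List.foldl_cons, pvSegs]
      rw [if_neg (by simp), ih (s ++ [st]) (by simp), pvAddLast_append]
      simp [pvAddLast_zero]

-- pitch values at kept positions, positionally
def pvPk : List (Bool × Int) → Int → List Int
  | [], _ => []
  | (d, st) :: r, off => if d then pvPk r (off + st) else off :: pvPk r (off + st)

-- successive gaps of a pitch list, closed by t
def pvGaps : List Int → Int → List Int
  | [], _ => []
  | k :: r, t => (r.headD t - k) :: pvGaps r t

lemma pvSegs_pk (pairs : List (Bool × Int)) : ∀ off : Int,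
    (pvSegs pairs).1 = (pvPk pairs off).headD (off + (pairs.map Prod.snd).sum) - off
    ∧ (pvSegs pairs).2 = pvGaps (pvPk pairs off) (off + (pairs.map Prod.snd).sum) := by
  induction pairs with
  | nil => intro off; simp [pvSegs, pvPk, pvGaps]
  | cons p r ih =>
    intro off
    obtain ⟨d, st⟩ := p
    have harith : off + (st + (r.map Prod.snd).sum) = (off + st) + (r.map Prod.snd).sum := by ring
    obtain ⟨ih1, ih2⟩ := ih (off + st)
    cases d with
    | true =>
      simp only [pvSegs, pvPk, List.map_cons, List.sum_cons, if_pos]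
      rw [harith, ih1, ih2]
      constructor
      · ring
      · rfl
    | false =>
      simp only [pvSegs, pvPk, List.map_cons, List.sum_cons, if_neg (by simp : ¬ (false : Bool) = true)]
      constructor
      · simp
      · rw [harith]
        rw [ih2, ih1]
        cases hk : pvPk r (off + st) with
        | nil =>
          simp only [pvGaps, List.headD_nil]
          congr 1
          ring
        | cons k0 kr =>
          simp only [pvGaps, List.headD_cons]
          congr 1
          ring

lemma pvGaps_ne_nil {kp : List Int} (h : kp ≠ []) (t : Int) : pvGaps kp t ≠ [] := by
  cases kp with
  | nil => simp at h
  | cons k r => simp [pvGaps]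

lemma pvGaps_dropLast (kp : List Int) (t : Int) :
    (pvGaps kp t).dropLast = (kp.zip kp.tail).map (fun ab => ab.2 - ab.1) := by
  induction kp with
  | nil => simp [pvGaps]
  | cons k r ih =>
    cases r with
    | nil => simp [pvGaps]
    | cons k' r' =>
      simp only [pvGaps, List.headD_cons, List.tail_cons, List.zip_cons_cons, List.map_cons] at ih ⊢
      rw [List.dropLast_cons_of_ne_nil (by simp)]
      simpa [pvGaps] using ih

lemma pvGaps_getLastD {kp : List Int} (h : kp ≠ []) (t : Int) :
    (pvGaps kp t).getLastD 0 = t - kp.getLastD 0 := by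
  induction kp with
  | nil => simp at h
  | cons k r ih =>
    cases r with
    | nil => simp [pvGaps]
    | cons k' r' =>
      have hih := ih (by simp)
      simp only [pvGaps, List.getLastD_cons] at *
      exact hih

-- the will_drops mask is the membership map of misses
lemma pvSet_map_range (D : Nat) (g : Int → Bool) (x : Int) (h0 : 0 ≤ x) (hx : x < (D : Int)) :
    ((List.range D).map (fun i : Nat => g (i : Int))).set x.toNat true
      = (List.range D).map (fun i : Nat => ((i : Int) == x) || g (i : Int)) := by
  apply List.ext_getElem
  · simp
  · intro i h1 h2
    simp only [List.length_map, List.length_range] at h1 h2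
    rw [List.getElem_set]
    simp only [List.getElem_map, List.getElem_range]
    split
    · rename_i hxi
      have : (i : Int) = x := by omega
      simp [this]
    · rename_i hxi
      have : ¬ (i : Int) = x := by omega
      simp [this]

lemma pvMaskFold (ms : List Int) : ∀ (g : Int → Bool) (D : Nat), (∀ x ∈ ms, 0 ≤ x ∧ x < (D : Int)) →
    ms.foldl (fun w x => w.set x.toNat true) ((List.range D).map (fun i : Nat => g (i : Int)))
      = (List.range D).map (fun i : Nat => g (i : Int) || ms.contains (i : Int)) := by
  induction ms with
  | nil => intro g D _; simp
  | cons x r ih =>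
    intro g D hb
    have hx := hb x (by simp)
    simp only [List.foldl_cons]
    rw [pvSet_map_range D g x hx.1 hx.2]
    rw [ih (fun z => (z == x) || g z) D (fun y hy => hb y (by simp [hy]))]
    apply List.map_congr_left
    intro i _
    by_cases hix : (i : Int) = x <;> cases hgi : g (i : Int) <;>
      simp [List.contains_cons, hix, hgi]

-- B's kept-pitch list equals the positional pvPk of the mask/steps pairs
lemma pvKpBridge (P : Int → Bool) : ∀ (steps' : List Int) (i off : Int),
    (((PySem.List.pyRange i (i + (steps'.length : Int))).zip (pvPitchAcc steps' off).1).filter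
        (fun x => !(P x.1))).map (fun x => x.2)
      = pvPk (((PySem.List.pyRange i (i + (steps'.length : Int))).map P).zip steps') off := by
  intro steps'
  induction steps' with
  | nil =>
    intro i off
    rw [PySem.List.pyRange_one_eq_nil (by simp)]
    simp [pvPk]
  | cons st r ih =>
    intro i off
    have hcons : PySem.List.pyRange i (i + ((st :: r).length : Int))
        = i :: PySem.List.pyRange (i + 1) ((i + 1) + (r.length : Int)) := by
      rw [show i + (((st :: r).length : Nat) : Int) = (i + 1) + (r.length : Int) by simp [List.length_cons]; ring]
      rw [PySem.List.pyRange_one_cons (by omega)]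
    rw [hcons]
    simp only [pvPitchAcc, List.map_cons, List.zip_cons_cons, List.filter_cons, pvPk]
    cases hP : P i with
    | true => simpa [pvPk, hP] using ih (i + 1) (off + st)
    | false => simpa [pvPk, hP] using ih (i + 1) (off + st)

lemma pvPitchAcc_snd (steps : List Int) : ∀ off : Int, (pvPitchAcc steps off).2 = off + steps.sum := by
  induction steps with
  | nil => intro off; simp [pvPitchAcc]
  | cons st r ih => intro off; simp [pvPitchAcc, ih (off + st)]; ring

lemma pvPitchAcc_length (steps : List Int) : ∀ off : Int, (pvPitchAcc steps off).1.length = steps.length := by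
  induction steps with
  | nil => intro off; simp [pvPitchAcc]
  | cons st r ih => intro off; simp [pvPitchAcc, ih (off + st)]

lemma pvGetLastD_of_ne_nil {l : List Int} (h : l ≠ []) (d : Int) : l.getLastD d = l.getLastD 0 := by
  rw [List.getLastD_eq_getLast?, List.getLastD_eq_getLast?, List.getLast?_eq_some_getLast h]
  rfl

-- per-combination equality of the two rows
lemma pvRow_eq (steps ms : List Int)
    (hms : ∀ x ∈ ms, 0 ≤ x ∧ x < (steps.length : Int))
    (hlen : ms.length < steps.length) :
    pvRowA steps ms = pvRowB (pvPitchAcc steps 0).1 (pvPitchAcc steps 0).2 (steps.length : Int)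
      (PySem.Set.ofList ms) := by
  set D := steps.length with hD
  set rng := PySem.List.pyRange 0 (D : Int) 1 with hrng
  -- the will_drops mask is the membership map of misses
  have hwd : ms.foldl (fun w x => w.set x.toNat true) (List.replicate D false)
      = rng.map (fun z => ms.contains z) := by
    have h0 : List.replicate D false
        = (List.range D).map (fun i : Nat => (fun _ : Int => false) (i : Int)) := by
      simp
    rw [h0, pvMaskFold ms (fun _ : Int => false) D hms]
    rw [hrng, PySem.List.pyRange_zero_natCast, List.map_map]
    simp
  set pairs := (rng.map (fun z => ms.contains z)).zip steps with hpairs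
  set a := (pvSegs pairs).1 with ha
  set l := (pvSegs pairs).2 with hl
  set kp := pvPk pairs 0 with hkp
  have hrlen : rng.length = D := by
    rw [hrng, PySem.List.length_pyRange_one]
    omega
  have hsnd : pairs.map Prod.snd = steps := by
    rw [hpairs, List.map_snd_zip (by simp [hrlen]; omega)]
  set t := (0 : Int) + steps.sum with ht
  have hsegs := pvSegs_pk pairs 0
  rw [hsnd] at hsegs
  obtain ⟨hsa, hsl⟩ := hsegs
  -- B's kept-pitch list is pvPk of the same pairs
  have hkpB : ((rng.zip (pvPitchAcc steps 0).1).filter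
        (fun x => !(ms.contains x.1))).map (fun x => x.2) = kp := by
    have h := pvKpBridge (fun z => ms.contains z) steps 0 0
    rw [zero_add] at h
    rw [hkp, hpairs, hrng, hD]
    exact h
  -- some note is kept
  have hkept : ∃ x ∈ rng.zip (pvPitchAcc steps 0).1, (!(ms.contains x.1)) = true := by
    by_contra hall
    push_neg at hall
    have hsub : rng ⊆ ms := by
      intro z hz
      obtain ⟨j, hj, hzj⟩ := List.mem_iff_getElem.mp hz
      have hjz : j < (rng.zip (pvPitchAcc steps 0).1).length := by
        rw [List.length_zip, pvPitchAcc_length]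
        simp [hrlen]
        omega
      have h1 := hall _ (List.getElem_mem hjz)
      simp at h1
      rw [hzj] at h1
      exact h1
    have hnd : rng.Nodup := by rw [hrng]; exact PySem.List.nodup_pyRange_one 0 (D : Int)
    have := List.Subperm.length_le (hnd.subperm hsub)
    omega
  have hkpne : kp ≠ [] := by
    rw [← hkpB]
    obtain ⟨x, hx, hpx⟩ := hkept
    have : x.2 ∈ (((rng.zip (pvPitchAcc steps 0).1).filter
        (fun x => !(ms.contains x.1))).map (fun x => x.2)) :=
      List.mem_map_of_mem (List.mem_filter.mpr ⟨hx, hpx⟩)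
    exact List.ne_nil_of_mem this
  have hlne : l ≠ [] := by
    rw [hl, hsl]
    exact pvGaps_ne_nil hkpne t
  -- evaluate A's row
  have hfold : (((ms.foldl (fun w x => w.set x.toNat true) (List.replicate D false)).zip
        steps).foldl (fun s p => if p.1 then pvAddLast s p.2 else s ++ [p.2]) [0])
      = (0 + a) :: l := by
    rw [hwd, ← hpairs, pvFoldA pairs [0] (by simp), ← ha, ← hl]
    rfl
  have hA : pvRowA steps ms = (0 + a + (t - kp.getLastD 0)) ::
      (kp.zip kp.tail).map (fun ab => ab.2 - ab.1) := by
    unfold pvRowA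
    dsimp only
    rw [hfold]
    rw [List.dropLast_cons_of_ne_nil hlne]
    simp only [List.getLastD_cons]
    rw [pvGetLastD_of_ne_nil hlne (0 + a)]
    rw [hl, hsl, pvGaps_getLastD hkpne t, pvGaps_dropLast kp t]
  -- evaluate B's row
  have hcont : ∀ z : Int, PySem.Set.contains (PySem.Set.ofList ms) z = ms.contains z := by
    intro z
    simp [PySem.Set.contains]
  have hB : pvRowB (pvPitchAcc steps 0).1 (pvPitchAcc steps 0).2 (D : Int) (PySem.Set.ofList ms)
      = (kp.headD t - kp.getLastD 0 + t) :: (kp.zip kp.tail).map (fun ab => ab.2 - ab.1) := by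
    unfold pvRowB
    have hfc : ((rng.zip (pvPitchAcc steps 0).1).filter
          (fun x => !(PySem.Set.contains (PySem.Set.ofList ms) x.1)))
        = ((rng.zip (pvPitchAcc steps 0).1).filter (fun x => !(ms.contains x.1))) := by
      apply List.filter_congr
      intro x _
      rw [hcont]
    rw [← hrng, hfc, hkpB]
    have htot : (pvPitchAcc steps 0).2 = t := by rw [pvPitchAcc_snd]
    cases hk : kp with
    | nil => exact absurd hk hkpne
    | cons k0 kr =>
      simp only [List.headD_cons, htot]
  rw [hA, hB]
  congr 1
  rw [ha, hsa, ← hkp, ← ht]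
  ring


-- ===== VERDICT (by name: the statement is the Claim_ definition above) =====
theorem miss_N_notes_spec : Claim_equal_miss_N_notes := by
  intro n steps _ hpre
  have hpre' : 0 < n ∧ n < (steps.length : Int) := hpre
  unfold Spec_miss_N_notes miss_N_notes miss_N_notes_alt
  dsimp only
  apply List.map_congr_left
  intro misses hmem
  have hsub := pvCombos_subset hmem
  have hlen := pvCombos_length hmem
  have hms : ∀ x ∈ misses, 0 ≤ x ∧ x < (steps.length : Int) := by
    intro x hx
    exact PySem.List.mem_pyRange_one.mp (hsub x hx)
  have hlt : misses.length < steps.length := by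
    obtain ⟨h1, h2⟩ := hpre'
    rw [hlen]
    omega
  rw [pvRow_eq steps misses hms hlt]
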